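-- pv_equiv track=rewrite | github.com/guozhiqi14/Fast-Distributed-Sentence-Representation | Utils/TextItem.py | get_ent_indices
-- ===== SOURCE A (Python) =====
-- def get_ent_indices(sent):
--   res       = []
--   entities  = []
--   for w in sent:
--     if w.startswith('ent_'):
--       start_id  = len(res)
--       for wb in w[4:].split('_'):
--         res += [wb]
--       entities += [(start_id, len(res))]
--     else:
--       res += [w]
--   return (' '.join(res), entities)
-- ===== SOURCE B (Python) =====
-- def get_ent_indices(sent):
--     # two-pass decomposition: expand each word to its token list first,
--     # then compute entity ranges from a running prefix-sum of lengths
--     groups = [(w.startswith('ent_'), w[4:].split('_') if w.startswith('ent_') else [w])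
--               for w in sent]
--     res = [t for _, ts in groups for t in ts]
--     entities = []
--     off = 0
--     for is_ent, ts in groups:
--         if is_ent:
--             entities.append((off, off + len(ts)))
--         off += len(ts)
--     return (' '.join(res), entities)
-- ===== Notes on version B (the rewrite author's own statement) =====
-- stated objective: alternative
-- what changed: B separates token expansion from offset bookkeeping: it maps each word to (is_entity, token-list), flattens the lists for the result string, and derives entity ranges from a prefix-sum of token-list lengths instead of tracking len(res) inline while appending.
import Mathlib
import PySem

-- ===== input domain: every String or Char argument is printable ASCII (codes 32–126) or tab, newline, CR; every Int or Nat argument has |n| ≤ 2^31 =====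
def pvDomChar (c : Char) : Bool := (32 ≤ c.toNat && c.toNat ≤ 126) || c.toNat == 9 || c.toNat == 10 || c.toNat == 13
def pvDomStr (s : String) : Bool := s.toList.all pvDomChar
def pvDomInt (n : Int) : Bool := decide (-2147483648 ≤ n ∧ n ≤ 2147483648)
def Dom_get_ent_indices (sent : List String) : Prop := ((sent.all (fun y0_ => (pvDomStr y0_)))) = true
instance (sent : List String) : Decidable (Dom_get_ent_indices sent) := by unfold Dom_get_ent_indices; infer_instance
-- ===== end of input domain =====

-- B restructures A as two passes: expand each word to (is_entity, token-list), then
-- derive entity ranges from a prefix-sum of token-list lengths; same cost ("alternative").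

-- ===== PORT A =====
def get_ent_indices (sent : List String) : String × (List (Int × Int)) :=
  let st := sent.foldl
    (fun (st : List String × List (Int × Int)) w =>
      if PySem.Str.startswith w "ent_" then
        let start_id : Int := st.1.length
        let res := ((PySem.Str.split? (PySem.Str.slice w (some 4) none) "_").getD []).foldl
          (fun r wb => r ++ [wb]) st.1
        (res, st.2 ++ [(start_id, (res.length : Int))])
      else (st.1 ++ [w], st.2))
    ([], [])
  (PySem.Str.join " " st.1, st.2)

-- ===== PORT B =====
def get_ent_indices_alt (sent : List String) : String × (List (Int × Int)) :=
  let groups := sent.map (fun w =>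
    (PySem.Str.startswith w "ent_",
     if PySem.Str.startswith w "ent_" then (PySem.Str.split? (PySem.Str.slice w (some 4) none) "_").getD []
     else [w]))
  let res := groups.flatMap (fun g => g.2)
  let st := groups.foldl
    (fun (st : List (Int × Int) × Int) g =>
      ((if g.1 then st.1 ++ [(st.2, st.2 + (g.2.length : Int))] else st.1),
       st.2 + (g.2.length : Int)))
    ([], 0)
  (PySem.Str.join " " res, st.1)

-- ===== PRECONDITION & SPEC =====
def Spec_get_ent_indices (sent : List String) (out : String × (List (Int × Int))) : Prop := out = get_ent_indices_alt sent
instance (sent : List String) (out : String × (List (Int × Int))) : Decidable (Spec_get_ent_indices sent out) := by unfold Spec_get_ent_indices; infer_instance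

-- ===== CLAIM (what is proved, stated in full; the proofs are below) =====
def Claim_equal_get_ent_indices : Prop := ∀ (sent : List String), Dom_get_ent_indices sent → Spec_get_ent_indices sent (get_ent_indices sent)

-- ===== LEMMAS AND PROOFS =====

-- the tokens one word contributes (shared shape of both ports' per-word work)
def pvTokens (w : String) : List String :=
  if PySem.Str.startswith w "ent_" then (PySem.Str.split? (PySem.Str.slice w (some 4) none) "_").getD []
  else [w]

lemma pv_foldl_append (ts r : List String) :
    ts.foldl (fun r wb => r ++ [wb]) r = r ++ ts := by
  induction ts generalizing r with
  | nil => simp only [List.foldl_nil, List.append_nil]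
  | cons t ts ih => simp only [List.foldl_cons, ih, List.append_assoc, List.singleton_append]

-- A's per-word step, rewritten in terms of pvTokens
lemma pv_fun_eq :
    (fun (st : List String × List (Int × Int)) (w : String) =>
      if PySem.Str.startswith w "ent_" then
        let start_id : Int := st.1.length
        let res := ((PySem.Str.split? (PySem.Str.slice w (some 4) none) "_").getD []).foldl
          (fun r wb => r ++ [wb]) st.1
        (res, st.2 ++ [(start_id, (res.length : Int))])
      else (st.1 ++ [w], st.2))
    = (fun st w =>
      (st.1 ++ pvTokens w,
       if PySem.Str.startswith w "ent_" then
         st.2 ++ [((st.1.length : Int), (st.1.length : Int) + ((pvTokens w).length : Int))]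
       else st.2)) := by
  funext st w
  by_cases hw : PySem.Str.startswith w "ent_" = true
  · simp only [hw, if_true, pv_foldl_append, pvTokens, List.length_append, Nat.cast_add]
  · simp only [hw, Bool.false_eq_true, if_false, pvTokens]

-- the canonical fold equals B's two passes, for any accumulators with off = r.length
lemma pv_main (sent : List String) (r : List String) (e : List (Int × Int)) :
    sent.foldl
      (fun (st : List String × List (Int × Int)) w =>
        (st.1 ++ pvTokens w,
         if PySem.Str.startswith w "ent_" then
           st.2 ++ [((st.1.length : Int), (st.1.length : Int) + ((pvTokens w).length : Int))]
         else st.2))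
      (r, e)
    = (r ++ (sent.map (fun w => (PySem.Str.startswith w "ent_", pvTokens w))).flatMap (fun g => g.2),
       ((sent.map (fun w => (PySem.Str.startswith w "ent_", pvTokens w))).foldl
         (fun (st : List (Int × Int) × Int) g =>
           ((if g.1 then st.1 ++ [(st.2, st.2 + (g.2.length : Int))] else st.1),
            st.2 + (g.2.length : Int)))
         (e, (r.length : Int))).1) := by
  induction sent generalizing r e with
  | nil => simp only [List.foldl_nil, List.map_nil, List.flatMap_nil, List.append_nil]
  | cons w ws ih =>
    rw [List.foldl_cons, List.map_cons, List.flatMap_cons, List.foldl_cons, ih]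
    simp only [List.length_append, Nat.cast_add, List.append_assoc]

-- ===== VERDICT (by name: the statement is the Claim_ definition above) =====
theorem get_ent_indices_spec : Claim_equal_get_ent_indices := by
  intro sent _
  unfold Spec_get_ent_indices get_ent_indices get_ent_indices_alt
  rw [pv_fun_eq]
  have h := pv_main sent [] []
  simp only [List.nil_append, List.length_nil, Nat.cast_zero] at h
  rw [h]
  rfl
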